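-- pv_equiv track=rewrite | github.com/picsag/algos | p14_balanced_strings.py | balanced_strings
-- ===== SOURCE A (Python) =====
-- def balanced_strings(s: str) -> int:
--     counter = 0
--     r = 0
--     for i in range(0, len(s)):
--         if s[i] == 'R':
--             r += 1
--         if s[i] == 'L':
--             r -= 1
--         if r == 0:
--             counter += 1
--     return counter
-- ===== SOURCE B (Python) =====
-- def balanced_strings(s: str) -> int:
--     # Divide and conquer: the prefix-balance sequence of a string is the
--     # left half's sequence followed by the right half's sequence shifted
--     # by the left half's total balance. The answer is the number of zeros.
--     def prefixes(chunk):
--         if len(chunk) == 1: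
--             c = chunk[0]
--             return [1 if c == 'R' else -1 if c == 'L' else 0]
--         mid = len(chunk) // 2
--         left = prefixes(chunk[:mid])
--         right = prefixes(chunk[mid:])
--         off = left[-1]
--         return left + [off + p for p in right]
--     if not s:
--         return 0
--     return prefixes(s).count(0)
-- ===== Notes on version B (the rewrite author's own statement) =====
-- stated objective: alternative
-- what changed: Replaces A's single linear scan with a running counter by a divide-and-conquer algorithm: recursively compute each half's prefix-balance sequence, merge them by shifting the right half's sequence by the left half's total balance, then count the zeros of the merged sequence.
import Mathlib
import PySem

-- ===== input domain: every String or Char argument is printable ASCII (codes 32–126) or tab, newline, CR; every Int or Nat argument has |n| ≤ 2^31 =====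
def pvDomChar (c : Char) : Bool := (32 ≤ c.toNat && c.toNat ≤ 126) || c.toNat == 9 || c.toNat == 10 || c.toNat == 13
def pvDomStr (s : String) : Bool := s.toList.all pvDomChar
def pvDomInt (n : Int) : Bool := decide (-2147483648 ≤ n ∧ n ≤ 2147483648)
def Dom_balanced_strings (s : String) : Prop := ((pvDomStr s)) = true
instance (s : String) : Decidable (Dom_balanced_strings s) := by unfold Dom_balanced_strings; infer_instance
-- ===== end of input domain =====

-- B replaces A's single linear scan by divide-and-conquer: each half's prefix-balance
-- sequence is computed recursively, the right one shifted by the left total, zeros counted.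

-- ===== PORT A =====
-- one loop step: update r by the two ifs, then bump counter if r = 0
def balanced_strings_step (st : Int × Int) (c : Char) : Int × Int :=
  let r := st.2 + (if c = 'R' then 1 else 0)
  let r := r + (if c = 'L' then -1 else 0)
  (if r = 0 then st.1 + 1 else st.1, r)

def balanced_strings (s : String) : Int :=
  (s.toList.foldl balanced_strings_step (0, 0)).1

-- ===== PORT B =====
-- per-character delta: 'R' → 1, 'L' → -1, else 0
def bs_delta (c : Char) : Int := if c = 'R' then 1 else if c = 'L' then -1 else 0

-- prefixes(chunk): prefix-balance sequence by divide and conquer.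
-- Python's left[-1] is ported as getLast?.getD 0: left is always nonempty
-- (prefixes of a nonempty chunk is nonempty), so the default is never used.
def bs_prefixes : List Char → List Int
  | [] => []          -- never called on []; Python's recursion only reaches chunks of length ≥ 1
  | [c] => [bs_delta c]
  | a :: b :: rest =>
      let left := bs_prefixes ((a :: b :: rest).take ((a :: b :: rest).length / 2))
      let right := bs_prefixes ((a :: b :: rest).drop ((a :: b :: rest).length / 2))
      let off := left.getLast?.getD 0
      left ++ right.map (fun p => off + p)
  termination_by l => l.length
  decreasing_by
    · simp only [List.length_take, List.length_cons]; omega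
    · simp only [List.length_drop, List.length_cons]; omega

def balanced_strings_alt (s : String) : Int :=
  if s.toList = [] then 0
  else ((bs_prefixes s.toList).count 0 : Int)

-- ===== PRECONDITION & SPEC =====
def Spec_balanced_strings (s : String) (out : Int) : Prop := out = balanced_strings_alt s
instance (s : String) (out : Int) : Decidable (Spec_balanced_strings s out) := by unfold Spec_balanced_strings; infer_instance

-- ===== CLAIM (what is proved, stated in full; the proofs are below) =====
def Claim_equal_balanced_strings : Prop := ∀ (s : String), Dom_balanced_strings s → Spec_balanced_strings s (balanced_strings s)

-- ===== LEMMAS AND PROOFS =====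

-- reference prefix-sum sequence (running sums starting from r)
def bs_scan (r : Int) : List Char → List Int
  | [] => []
  | c :: cs => (r + bs_delta c) :: bs_scan (r + bs_delta c) cs

lemma bs_scan_shift (a r : Int) (l : List Char) :
    bs_scan (a + r) l = (bs_scan r l).map (fun p => a + p) := by
  induction l generalizing r with
  | nil => simp [bs_scan]
  | cons c cs ih => simp [bs_scan, add_assoc, ih (r + bs_delta c)]

lemma bs_scan_append (r : Int) (l₁ l₂ : List Char) :
    bs_scan r (l₁ ++ l₂) = bs_scan r l₁ ++ bs_scan (r + (l₁.map bs_delta).sum) l₂ := by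
  induction l₁ generalizing r with
  | nil => simp [bs_scan]
  | cons c cs ih => simp [bs_scan, ih, add_assoc]

lemma bs_scan_getLast (r : Int) (l : List Char) (h : l ≠ []) :
    (bs_scan r l).getLast?.getD 0 = r + (l.map bs_delta).sum := by
  induction l generalizing r with
  | nil => exact absurd rfl h
  | cons c cs ih =>
    cases cs with
    | nil => simp [bs_scan]
    | cons d ds =>
      have := ih (r := r + bs_delta c) (by simp)
      simp only [bs_scan, List.map_cons, List.sum_cons] at *
      rw [List.getLast?_cons_cons] at *
      rw [this]; ring

lemma bs_prefixes_eq_scan (l : List Char) (h : l ≠ []) :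
    bs_prefixes l = bs_scan 0 l := by
  induction l using bs_prefixes.induct with
  | case1 => exact absurd rfl h
  | case2 c => simp [bs_prefixes, bs_scan]
  | case3 a b rest ihl ihr =>
    simp only [bs_prefixes]
    set mid := (a :: b :: rest).length / 2 with hmiddef
    have hmidlb : 1 ≤ mid := by simp only [hmiddef, List.length_cons]; omega
    have hmidub : mid < (a :: b :: rest).length := by
      simp only [hmiddef, List.length_cons]; omega
    have htake : (a :: b :: rest).take mid ≠ [] := by
      intro hc
      have := congrArg List.length hc
      simp only [List.length_take, List.length_nil] at this
      omega
    have hdrop : (a :: b :: rest).drop mid ≠ [] := by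
      intro hc
      have := congrArg List.length hc
      simp only [List.length_drop, List.length_nil] at this
      omega
    have hl := ihl htake
    have hr := ihr hdrop
    have hsplit : (a :: b :: rest) = (a :: b :: rest).take mid ++ (a :: b :: rest).drop mid :=
      (List.take_append_drop mid _).symm
    rw [hl, hr]
    have hoff : (bs_scan 0 ((a :: b :: rest).take mid)).getLast?.getD 0
        = (((a :: b :: rest).take mid).map bs_delta).sum := by
      rw [bs_scan_getLast _ _ htake]; ring
    conv_rhs => rw [hsplit]
    rw [bs_scan_append, zero_add, hoff, ← bs_scan_shift, add_zero]

-- A's fold counts exactly the zeros of the running prefix sums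
lemma bs_step_delta (st : Int × Int) (c : Char) :
    balanced_strings_step st c =
      (if st.2 + bs_delta c = 0 then st.1 + 1 else st.1, st.2 + bs_delta c) := by
  simp only [balanced_strings_step, bs_delta]
  by_cases hR : c = 'R' <;> by_cases hL : c = 'L' <;> simp_all

lemma bs_fold_eq (l : List Char) (cnt r : Int) :
    (l.foldl balanced_strings_step (cnt, r)).1 = cnt + ((bs_scan r l).count 0 : Int) := by
  induction l generalizing cnt r with
  | nil => simp [bs_scan]
  | cons c cs ih =>
    simp only [List.foldl_cons, bs_step_delta, bs_scan, List.count_cons]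
    by_cases h : r + bs_delta c = 0
    · simp [h, ih]; ring
    · simp [h, ih]

-- ===== VERDICT (by name: the statement is the Claim_ definition above) =====
theorem balanced_strings_spec : Claim_equal_balanced_strings := by
  intro s _
  show balanced_strings s = balanced_strings_alt s
  unfold balanced_strings balanced_strings_alt
  by_cases h : s.toList = []
  · simp [h]
  · rw [if_neg h, bs_prefixes_eq_scan _ h, bs_fold_eq, zero_add]
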